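-- pv_equiv track=rewrite | github.com/Yeounui/Study | Assignments/Informatics/Tutoring/Practice/Cellophane.py | purple
-- ===== SOURCE A (Python) =====
-- def purple(givenlist):
--     redcover = list()
--     bluecover = list()
--     marked = 0
--     for atuple in givenlist:
--         if atuple[-1] == 'R':
--             redcover.append(atuple[:-1])
--         else:
--             bluecover.append(atuple[:-1])
--     for redsquare in redcover:
--         redrowlist = [x for x in range(redsquare[0], redsquare[0]+redsquare[2])]
--         redcolumnlist = [x for x in range(redsquare[1], redsquare[1]+redsquare[3])]
--         for bluesquare in bluecover:
--             bluerowlist = [x for x in range(bluesquare[0], bluesquare[0]+bluesquare[2])]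
--             bluecolumnlist = [x for x in range(bluesquare[1], bluesquare[1]+bluesquare[3])]
--             bluerowlist1 = list(bluerowlist)
--             bluecolumnlist1 = list(bluecolumnlist)
--             for rednumber in redrowlist:
--                 if rednumber in bluerowlist:
--                     bluerowlist.remove(rednumber)
--             rowlist = len(bluerowlist1) - len(bluerowlist)
--             for rednumber in redcolumnlist:
--                 if rednumber in bluecolumnlist:
--                     bluecolumnlist.remove(rednumber)
--             columnlist = len(bluecolumnlist1) - len(bluecolumnlist)
--             marked += (rowlist)*(columnlist)
--     return marked
-- ===== SOURCE B (Python) =====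
-- def purple(givenlist):
--     reds = [t[:4] for t in givenlist if t[4] == 'R']
--     blues = [t[:4] for t in givenlist if t[4] != 'R']
--     total = 0
--     for (rx, ry, rw, rh) in reds:
--         for (bx, by, bw, bh) in blues:
--             ox = min(rx + rw, bx + bw) - max(rx, bx)
--             oy = min(ry + rh, by + bh) - max(ry, by)
--             if ox > 0 and oy > 0:
--                 total += ox * oy
--     return total
-- ===== Notes on version B (the rewrite author's own statement) =====
-- stated objective: faster
-- what changed: replaces building explicit coordinate index lists and removing matching indices one by one with a closed-form interval-intersection length per axis (max 0 (min of ends - max of starts))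
import Mathlib
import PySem

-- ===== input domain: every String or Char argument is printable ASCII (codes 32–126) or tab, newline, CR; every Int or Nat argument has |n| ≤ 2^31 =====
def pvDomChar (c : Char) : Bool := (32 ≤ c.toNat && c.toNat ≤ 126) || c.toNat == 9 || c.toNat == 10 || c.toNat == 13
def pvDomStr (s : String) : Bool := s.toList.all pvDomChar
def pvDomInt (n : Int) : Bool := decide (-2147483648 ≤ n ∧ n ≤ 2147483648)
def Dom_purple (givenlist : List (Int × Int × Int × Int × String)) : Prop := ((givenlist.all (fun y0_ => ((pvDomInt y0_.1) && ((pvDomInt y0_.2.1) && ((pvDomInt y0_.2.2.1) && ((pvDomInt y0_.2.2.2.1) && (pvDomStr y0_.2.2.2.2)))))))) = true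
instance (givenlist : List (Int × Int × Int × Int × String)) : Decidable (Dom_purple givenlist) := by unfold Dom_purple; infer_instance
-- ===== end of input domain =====

-- B changes the algorithm: the per-pair overlap is computed arithmetically as an interval-intersection
-- length per axis instead of building index lists and removing matched entries one by one.

-- ===== PORT A =====
-- 'for rednumber in redrowlist: if rednumber in bluerowlist: bluerowlist.remove(rednumber)'
def purpleRemoveLoop (red blue : List Int) : List Int :=
  red.foldl (fun l x => if l.contains x then (PySem.List.remove? l x).getD l else l) blue

-- body of the inner 'for bluesquare in bluecover' loop (redrowlist/redcolumnlist precomputed)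
def purpleInner (redrowlist redcolumnlist : List Int) (marked : Int)
    (bluesquare : Int × Int × Int × Int) : Int :=
  let bluerowlist := PySem.List.pyRange bluesquare.1 (bluesquare.1 + bluesquare.2.2.1) 1
  let bluecolumnlist := PySem.List.pyRange bluesquare.2.1 (bluesquare.2.1 + bluesquare.2.2.2) 1
  let bluerowlist1 := bluerowlist
  let bluecolumnlist1 := bluecolumnlist
  let bluerowlist' := purpleRemoveLoop redrowlist bluerowlist
  let rowlist : Int := (bluerowlist1.length : Int) - (bluerowlist'.length : Int)
  let bluecolumnlist' := purpleRemoveLoop redcolumnlist bluecolumnlist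
  let columnlist : Int := (bluecolumnlist1.length : Int) - (bluecolumnlist'.length : Int)
  marked + rowlist * columnlist

def purple (givenlist : List (Int × Int × Int × Int × String)) : Int :=
  let covers := givenlist.foldl
    (fun (acc : List (Int × Int × Int × Int) × List (Int × Int × Int × Int)) atuple =>
      if atuple.2.2.2.2 == "R" then
        (acc.1 ++ [(atuple.1, atuple.2.1, atuple.2.2.1, atuple.2.2.2.1)], acc.2)
      else
        (acc.1, acc.2 ++ [(atuple.1, atuple.2.1, atuple.2.2.1, atuple.2.2.2.1)]))
    ([], [])
  let redcover := covers.1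
  let bluecover := covers.2
  redcover.foldl
    (fun marked redsquare =>
      let redrowlist := PySem.List.pyRange redsquare.1 (redsquare.1 + redsquare.2.2.1) 1
      let redcolumnlist := PySem.List.pyRange redsquare.2.1 (redsquare.2.1 + redsquare.2.2.2) 1
      bluecover.foldl (purpleInner redrowlist redcolumnlist) marked)
    0

-- ===== PORT B =====
def purple_alt (givenlist : List (Int × Int × Int × Int × String)) : Int :=
  let reds := (givenlist.filter (fun t => t.2.2.2.2 == "R")).map
    (fun t => (t.1, t.2.1, t.2.2.1, t.2.2.2.1))
  let blues := (givenlist.filter (fun t => ¬ (t.2.2.2.2 == "R"))).map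
    (fun t => (t.1, t.2.1, t.2.2.1, t.2.2.2.1))
  reds.foldl
    (fun total r =>
      blues.foldl
        (fun total b =>
          let ox := min (r.1 + r.2.2.1) (b.1 + b.2.2.1) - max r.1 b.1
          let oy := min (r.2.1 + r.2.2.2) (b.2.1 + b.2.2.2) - max r.2.1 b.2.1
          if ox > 0 ∧ oy > 0 then total + ox * oy else total)
        total)
    0

-- ===== PRECONDITION & SPEC =====
def Spec_purple (givenlist : List (Int × Int × Int × Int × String)) (out : Int) : Prop := out = purple_alt givenlist
instance (givenlist : List (Int × Int × Int × Int × String)) (out : Int) : Decidable (Spec_purple givenlist out) := by unfold Spec_purple; infer_instance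

-- ===== CLAIM (what is proved, stated in full; the proofs are below) =====
def Claim_equal_purple : Prop := ∀ (givenlist : List (Int × Int × Int × Int × String)), Dom_purple givenlist → Spec_purple givenlist (purple givenlist)

-- ===== LEMMAS AND PROOFS =====

-- the removal loop on a duplicate-free list is a filter
theorem purpleRemoveLoop_eq_filter (red : List Int) :
    ∀ blue : List Int, blue.Nodup →
      purpleRemoveLoop red blue = blue.filter (fun y => ¬ red.contains y) := by
  induction red with
  | nil => intro blue _; simp [purpleRemoveLoop]
  | cons x red ih =>
    intro blue hnd
    have hstep : (if blue.contains x then (PySem.List.remove? blue x).getD blue else blue)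
        = blue.filter (fun y => y ≠ x) := by
      by_cases hx : x ∈ blue
      · rw [if_pos (by simpa using hx), PySem.List.remove?_eq_some_erase _ _ hx]
        simpa using hnd.erase_eq_filter x
      · rw [if_neg (by simpa using hx)]
        exact (List.filter_eq_self.mpr (fun y hy => by
          simp only [decide_eq_true_eq, ne_eq]; rintro rfl; exact hx hy)).symm
    have hcons : purpleRemoveLoop (x :: red) blue
        = purpleRemoveLoop red (blue.filter (fun y => y ≠ x)) := by
      unfold purpleRemoveLoop
      rw [List.foldl_cons, hstep]
    rw [hcons, ih _ (hnd.filter _), List.filter_filter]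
    apply List.filter_congr
    intro y _
    simp only [List.contains_cons, decide_not, Bool.and_comm, ne_eq]
    cases h1 : (y == x) <;> cases h2 : red.contains y <;> simp_all

-- length of the intersection of two integer intervals, in closed form
theorem countP_pyRange_mem (a b c d : Int) :
    ((PySem.List.pyRange c d 1).countP
        (fun y => (PySem.List.pyRange a b 1).contains y))
      = (min b d - max a c).toNat := by
  have h : ∀ n : ℕ, ∀ c : Int, (d - c).toNat = n →
      ((PySem.List.pyRange c d 1).countP
          (fun y => (PySem.List.pyRange a b 1).contains y))
        = (min b d - max a c).toNat := by
    intro n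
    induction n with
    | zero =>
      intro c hc
      rw [PySem.List.pyRange_one_eq_nil (a := c) (b := d) (by omega)]
      simp only [List.countP_nil]
      omega
    | succ n ih =>
      intro c hc
      rw [show PySem.List.pyRange c d 1 = c :: PySem.List.pyRange (c + 1) d 1 from
        PySem.List.pyRange_one_cons (by omega)]
      rw [List.countP_cons, ih (c + 1) (by omega)]
      by_cases hm : c ∈ PySem.List.pyRange a b 1
      · have hab := (PySem.List.mem_pyRange_one).1 hm
        simp [List.contains_eq_mem, hm]
        omega
      · have hab : ¬ (a ≤ c ∧ c < b) := fun h' => hm ((PySem.List.mem_pyRange_one).2 h')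
        simp [List.contains_eq_mem, hm]
        omega
  exact h (d - c).toNat c rfl

-- A's per-axis removed-count equals the closed-form intersection length
theorem removed_count (a b c d : Int) :
    ((PySem.List.pyRange c d 1).length : Int)
        - ((purpleRemoveLoop (PySem.List.pyRange a b 1) (PySem.List.pyRange c d 1)).length : Int)
      = max 0 (min b d - max a c) := by
  rw [purpleRemoveLoop_eq_filter _ _ (PySem.List.nodup_pyRange_one (a := c) (b := d)),
    ← List.countP_eq_length_filter]
  have hsplit := List.length_eq_countP_add_countP
    (l := PySem.List.pyRange c d 1)
    (p := fun y => (PySem.List.pyRange a b 1).contains y)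
  have hcount := countP_pyRange_mem a b c d
  have hlen : (PySem.List.pyRange c d 1).length = (d - c).toNat :=
    PySem.List.length_pyRange_one c d
  omega

-- the two per-pair contributions agree
theorem inner_eq (redsquare bluesquare : Int × Int × Int × Int) (marked : Int) :
    purpleInner (PySem.List.pyRange redsquare.1 (redsquare.1 + redsquare.2.2.1) 1)
        (PySem.List.pyRange redsquare.2.1 (redsquare.2.1 + redsquare.2.2.2) 1)
        marked bluesquare
      = (let ox := min (redsquare.1 + redsquare.2.2.1) (bluesquare.1 + bluesquare.2.2.1)
            - max redsquare.1 bluesquare.1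
         let oy := min (redsquare.2.1 + redsquare.2.2.2) (bluesquare.2.1 + bluesquare.2.2.2)
            - max redsquare.2.1 bluesquare.2.1
         if ox > 0 ∧ oy > 0 then marked + ox * oy else marked) := by
  simp only [purpleInner, removed_count]
  set x := min (redsquare.1 + redsquare.2.2.1) (bluesquare.1 + bluesquare.2.2.1)
      - max redsquare.1 bluesquare.1 with hx
  set y := min (redsquare.2.1 + redsquare.2.2.2) (bluesquare.2.1 + bluesquare.2.2.2)
      - max redsquare.2.1 bluesquare.2.1 with hy
  by_cases hxy : x > 0 ∧ y > 0
  · rw [if_pos hxy]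
    have h1 : max 0 x = x := by omega
    have h2 : max 0 y = y := by omega
    rw [h1, h2]
  · rw [if_neg hxy]
    have : max 0 x * max 0 y = 0 := by
      rcases not_and_or.1 hxy with h | h
      · have h0 : max 0 x = 0 := by omega
        rw [h0, zero_mul]
      · have h0 : max 0 y = 0 := by omega
        rw [h0, mul_zero]
    rw [this, add_zero]

-- A's classification pass builds (filter R, filter not-R)
theorem covers_eq (givenlist : List (Int × Int × Int × Int × String)) :
    ∀ accr accb : List (Int × Int × Int × Int),
    givenlist.foldl
      (fun (acc : List (Int × Int × Int × Int) × List (Int × Int × Int × Int)) atuple =>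
        if atuple.2.2.2.2 == "R" then
          (acc.1 ++ [(atuple.1, atuple.2.1, atuple.2.2.1, atuple.2.2.2.1)], acc.2)
        else
          (acc.1, acc.2 ++ [(atuple.1, atuple.2.1, atuple.2.2.1, atuple.2.2.2.1)]))
      (accr, accb)
    = (accr ++ ((givenlist.filter (fun t => t.2.2.2.2 == "R")).map
          (fun t => (t.1, t.2.1, t.2.2.1, t.2.2.2.1))),
       accb ++ ((givenlist.filter (fun t => ¬ (t.2.2.2.2 == "R"))).map
          (fun t => (t.1, t.2.1, t.2.2.1, t.2.2.2.1)))) := by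
  induction givenlist with
  | nil => intro accr accb; simp
  | cons t l ih =>
    intro accr accb
    rw [List.foldl_cons]
    by_cases ht : t.2.2.2.2 = "R"
    · rw [if_pos (by simpa using ht), ih]
      simp [ht]
    · rw [if_neg (by simpa using ht), ih]
      simp [ht]

-- ===== VERDICT (by name: the statement is the Claim_ definition above) =====
theorem purple_spec : Claim_equal_purple := by
  intro givenlist _
  show purple givenlist = purple_alt givenlist
  unfold purple purple_alt
  rw [covers_eq givenlist [] []]
  simp only [List.nil_append]
  apply PySem.List.foldl_congr_mem
  intro marked r _
  apply PySem.List.foldl_congr_mem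
  intro m b _
  exact inner_eq r b m
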